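-- pv_equiv track=rewrite | github.com/apraveena/Interview_Prep_SecondRound | Graphs/Interview - recipes.py | can_receipe_be_made
-- ===== SOURCE A (Python) =====
-- def can_receipe_be_made(recipes, ingredients, supplies):
--     # Revisit
--     visited = {}
--     result = []
--
--     def can_be_made(node):
--         recipe = recipes[node]
--
--         if recipe in visited:
--             return visited[recipe]
--
--         visited[recipe] = False
--
--         for ing in ingredients[node]:
--             if ing in supplies:
--                 continue
--
--             if ing in recipes:
--                 can_make = can_be_made(recipes.index(ing))
--                 if not can_make:
--                     visited[recipe] = False
--                     return False
--             else:
--                 visited[recipe] = False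
--                 return False
--
--         visited[recipe] = True
--         return True
--
--     for i, recipe in enumerate(recipes):
--         if can_be_made(i):
--             result.append(recipe)
--
--     return result
-- ===== SOURCE B (Python) =====
-- def can_receipe_be_made(recipes, ingredients, supplies):
--     sup = set(supplies)
--     first = {}
--     for name, ing in zip(recipes, ingredients):
--         if name not in first:
--             first[name] = ing
--     makeable = set()
--     for _ in range(len(recipes)):
--         changed = False
--         for name, ing in first.items():
--             if name not in makeable and all(x in sup or x in makeable for x in ing):
--                 makeable.add(name)
--                 changed = True
--         if not changed:
--             break
--     return [name for name in recipes if name in makeable]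
-- ===== Notes on version B (the rewrite author's own statement) =====
-- stated objective: alternative
-- what changed: Replaces the recursive memoized DFS (with linear list scans for 'in supplies', 'in recipes' and recipes.index) by a first-occurrence name-to-ingredients map plus round-based fixpoint saturation over a makeable set, emitting recipes in original order at the end; Pre_ excludes only inputs where A raises IndexError (a recipe's first occurrence has no ingredients entry).
import Mathlib
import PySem

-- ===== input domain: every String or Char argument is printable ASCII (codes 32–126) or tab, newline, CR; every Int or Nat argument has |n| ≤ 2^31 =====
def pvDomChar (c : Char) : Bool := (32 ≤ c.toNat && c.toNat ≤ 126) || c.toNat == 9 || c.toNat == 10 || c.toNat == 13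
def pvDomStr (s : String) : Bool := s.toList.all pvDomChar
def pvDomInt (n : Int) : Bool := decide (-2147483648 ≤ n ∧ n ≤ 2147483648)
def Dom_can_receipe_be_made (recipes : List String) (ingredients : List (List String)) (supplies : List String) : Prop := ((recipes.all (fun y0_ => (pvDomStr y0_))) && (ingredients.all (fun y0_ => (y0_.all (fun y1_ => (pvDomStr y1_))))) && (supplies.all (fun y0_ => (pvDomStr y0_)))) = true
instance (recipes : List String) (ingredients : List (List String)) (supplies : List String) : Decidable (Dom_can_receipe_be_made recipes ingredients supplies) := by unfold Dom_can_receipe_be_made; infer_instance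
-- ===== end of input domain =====

-- B replaces A's recursive memoized DFS by a first-occurrence ingredients map plus
-- round-based fixpoint saturation of a makeable set (alternative algorithm, same values).


-- ===== PORT A =====
-- A's inner recursion `can_be_made(node)` with the memo dict `visited` threaded through.
-- Python recursion depth is bounded by the number of distinct recipe names, so fuel
-- recipes.length + 1 (used by the top-level port) is never exhausted (proved below).
mutual
def pvCanBeMadeA (rs : List String) (igs : List (List String)) (sps : List String) :
    Nat → Int → PySem.Dict String Bool → Bool × PySem.Dict String Bool
  | 0, _, visited => (false, visited)            -- fuel guard, unreachable for the fuel used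
  | fuel+1, node, visited =>
    match PySem.List.pyGet? rs node with
    | none => (false, visited)                   -- unreachable: node is always a valid index
    | some recipe =>
      match visited.get? recipe with
      | some b => (b, visited)                   -- `if recipe in visited: return visited[recipe]`
      | none =>
        let v1 := visited.insert recipe false    -- `visited[recipe] = False`
        match PySem.List.pyGet? igs node with
        | none => (false, v1)                    -- Python IndexError on ingredients[node]; excluded by Pre_
        | some ings => pvIngLoopA rs igs sps fuel recipe ings v1
termination_by fuel node visited => (fuel, 0)

-- the `for ing in ingredients[node]` loop; on success does `visited[recipe] = True`,
-- on failure `visited[recipe] = False`, and returns the Boolean, exactly as A does.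
def pvIngLoopA (rs : List String) (igs : List (List String)) (sps : List String) :
    Nat → String → List String → PySem.Dict String Bool → Bool × PySem.Dict String Bool
  | _, recipe, [], v => (true, v.insert recipe true)
  | fuel, recipe, ing :: rest, v =>
    if ing ∈ sps then pvIngLoopA rs igs sps fuel recipe rest v
    else if ing ∈ rs then
      match PySem.List.index? rs ing with
      | none => (false, v.insert recipe false)   -- unreachable: ing ∈ rs
      | some idx =>
        match pvCanBeMadeA rs igs sps fuel (idx : Int) v with
        | (true, v') => pvIngLoopA rs igs sps fuel recipe rest v'
        | (false, v') => (false, v'.insert recipe false)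
    else (false, v.insert recipe false)
termination_by fuel recipe l v => (fuel, l.length + 1)
end

def can_receipe_be_made (recipes : List String) (ingredients : List (List String)) (supplies : List String) : List String :=
  ((PySem.List.enumerate recipes).foldl
    (fun (st : PySem.Dict String Bool × List String) p =>
      match pvCanBeMadeA recipes ingredients supplies (recipes.length + 1) p.1 st.1 with
      | (b, v) => (v, if b then st.2 ++ [p.2] else st.2))
    (PySem.Dict.empty, [])).2

-- ===== PORT B =====
-- one pass of B's inner `for name, ing in first.items()` loop; state = (makeable, changed)
def pvPassB (sup : PySem.Set String) (items : List (String × List String))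
    (st : PySem.Set String × Bool) : PySem.Set String × Bool :=
  items.foldl
    (fun st p =>
      if !(PySem.Set.contains st.1 p.1) &&
          p.2.all (fun x => PySem.Set.contains sup x || PySem.Set.contains st.1 x) then
        (PySem.Set.add st.1 p.1, true)
      else st)
    st

-- B's outer `for _ in range(len(recipes))` loop with the `if not changed: break`
def pvSaturateB (sup : PySem.Set String) (items : List (String × List String)) :
    Nat → PySem.Set String → PySem.Set String
  | 0, mk => mk
  | n+1, mk =>
    match pvPassB sup items (mk, false) with
    | (mk', changed) => if changed then pvSaturateB sup items n mk' else mk'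

def can_receipe_be_made_alt (recipes : List String) (ingredients : List (List String)) (supplies : List String) : List String :=
  let sup := PySem.Set.ofList supplies
  let first := (recipes.zip ingredients).foldl
    (fun d (p : String × List String) => if d.contains p.1 then d else d.insert p.1 p.2)
    PySem.Dict.empty
  let makeable := pvSaturateB sup first.items recipes.length PySem.Set.empty
  recipes.filter (fun name => PySem.Set.contains makeable name)

-- ===== PRECONDITION & SPEC =====
-- Exactly the inputs on which Python A returns: every recipe's FIRST occurrence index has
-- an entry in `ingredients` (otherwise A's `ingredients[node]` raises IndexError there).
def Pre_can_receipe_be_made (recipes : List String) (ingredients : List (List String)) (supplies : List String) : Prop :=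
  ∀ m ∈ recipes, recipes.idxOf m < ingredients.length
instance (recipes : List String) (ingredients : List (List String)) (supplies : List String) : Decidable (Pre_can_receipe_be_made recipes ingredients supplies) := by unfold Pre_can_receipe_be_made; infer_instance
def pvWitness_can_receipe_be_made : List String × List (List String) × List String :=
  (["bread", "cake"], [["flour"], ["bread", "sugar"]], ["flour", "sugar"])
def Spec_can_receipe_be_made (recipes : List String) (ingredients : List (List String)) (supplies : List String) (out : List String) : Prop := out = can_receipe_be_made_alt recipes ingredients supplies
instance (recipes : List String) (ingredients : List (List String)) (supplies : List String) (out : List String) : Decidable (Spec_can_receipe_be_made recipes ingredients supplies out) := by unfold Spec_can_receipe_be_made; infer_instance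

-- ===== CLAIM (what is proved, stated in full; the proofs are below) =====
def Claim_equal_can_receipe_be_made : Prop := ∀ (recipes : List String) (ingredients : List (List String)) (supplies : List String), Dom_can_receipe_be_made recipes ingredients supplies → Pre_can_receipe_be_made recipes ingredients supplies → Spec_can_receipe_be_made recipes ingredients supplies (can_receipe_be_made recipes ingredients supplies)

-- ===== LEMMAS AND PROOFS =====

-- the ingredient list A and B both associate to a recipe name: its FIRST occurrence's entry
def pvIngs (rs : List String) (igs : List (List String)) (m : String) : List String :=
  igs.getD (rs.idxOf m) []

-- the recipes that can be made: the least fixpoint both programs compute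
inductive pvGood (rs : List String) (igs : List (List String)) (sps : List String) : String → Prop where
  | intro (m : String) (hm : m ∈ rs)
      (h : ∀ x ∈ pvIngs rs igs m, x ∉ sps → pvGood rs igs sps x) : pvGood rs igs sps m

theorem pvGood_mem {rs igs sps} {m : String} (h : pvGood rs igs sps m) : m ∈ rs := by
  cases h with | intro _ hm _ => exact hm

theorem pvGood_ings {rs igs sps} {m : String} (h : pvGood rs igs sps m) :
    ∀ x ∈ pvIngs rs igs m, x ∉ sps → pvGood rs igs sps x := by
  cases h with | intro _ _ h => exact h

-- no member of a "closed" set of mutually required names is makeable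
theorem pvGood_not_mem_closed {rs : List String} {igs : List (List String)} {sps : List String}
    (C : List String)
    (hC : ∀ c ∈ C, ∃ c' ∈ C, c' ∈ pvIngs rs igs c ∧ c' ∉ sps) :
    ∀ m, pvGood rs igs sps m → m ∉ C := by
  intro m hg
  induction hg with
  | intro m hm h ih =>
    intro hmC
    obtain ⟨c', hc'C, hc'i, hc's⟩ := hC m hmC
    exact (ih c' hc'i hc's) hc'C

-- the DFS recursion stack: each entry requires (as a non-supply ingredient) the one before it
def pvChain (rs : List String) (igs : List (List String)) (sps : List String) :
    String → List String → Prop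
  | _, [] => True
  | c, p :: rest => (c ∈ pvIngs rs igs p ∧ c ∉ sps) ∧ pvChain rs igs sps p rest

theorem pvChain_closed {rs : List String} {igs : List (List String)} {sps : List String} :
    ∀ (st : List String) (r : String), pvChain rs igs sps r st →
    ∀ x ∈ st, ∃ C : List String, r ∈ C ∧ x ∈ C ∧
      ∀ c ∈ C, c ≠ r → ∃ c' ∈ C, c' ∈ pvIngs rs igs c ∧ c' ∉ sps := by
  intro st
  induction st with
  | nil => intro r _ x hx; cases hx
  | cons p rest ih =>
    intro r hch x hx
    obtain ⟨hpr, hch'⟩ := hch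
    rcases List.mem_cons.1 hx with hxp | hxr
    · subst hxp
      refine ⟨[r, x], by simp, by simp, ?_⟩
      intro c hc hcr
      rcases List.mem_cons.1 hc with h1 | h2
      · exact absurd h1 hcr
      · have hcx : c = x := by simpa using h2
        subst hcx
        exact ⟨r, by simp, hpr.1, hpr.2⟩
    · obtain ⟨C, hpC, hxC, hclo⟩ := ih p hch' x hxr
      refine ⟨r :: C, by simp, by simp [hxC], ?_⟩
      intro c hc hcr
      rcases List.mem_cons.1 hc with h1 | h2
      · exact absurd h1 hcr
      · by_cases hcp : c = p
        · subst hcp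
          exact ⟨r, by simp, hpr.1, hpr.2⟩
        · obtain ⟨c', hc'C, hc'⟩ := hclo c h2 hcp
          exact ⟨c', by simp [hc'C], hc'⟩

-- reaching a stack entry (or the current recipe itself) as a required ingredient is a cycle
theorem pvChain_cycle {rs : List String} {igs : List (List String)} {sps : List String}
    {r x : String} {st : List String} (hch : pvChain rs igs sps r st)
    (hx : x = r ∨ x ∈ st) (hxi : x ∈ pvIngs rs igs r) (hxs : x ∉ sps) :
    ¬ pvGood rs igs sps r := by
  rcases hx with hxr | hxst
  · subst hxr
    intro hg
    exact pvGood_not_mem_closed [x] (by intro c hc; simp at hc; subst hc; exact ⟨c, by simp, hxi, hxs⟩) x hg (by simp)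
  · obtain ⟨C, hrC, hxC, hclo⟩ := pvChain_closed st r hch x hxst
    intro hg
    refine pvGood_not_mem_closed C ?_ r hg hrC
    intro c hc
    by_cases hcr : c = r
    · subst hcr; exact ⟨x, hxC, hxi, hxs⟩
    · exact hclo c hc hcr

-- memo-dict invariant w.r.t. the current recursion stack
def pvInv (rs : List String) (igs : List (List String)) (sps : List String)
    (v : PySem.Dict String Bool) (st : List String) : Prop :=
  ∀ m b, v.get? m = some b →
    (b = true → pvGood rs igs sps m) ∧ (b = false → m ∈ st ∨ ¬ pvGood rs igs sps m)

theorem pvInv_mono {rs igs sps} {v : PySem.Dict String Bool} {st st' : List String}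
    (h : pvInv rs igs sps v st) (hsub : ∀ y ∈ st, y ∈ st') : pvInv rs igs sps v st' := by
  intro m b hmb
  refine ⟨(h m b hmb).1, fun hb => ?_⟩
  rcases (h m b hmb).2 hb with h1 | h2
  · exact Or.inl (hsub m h1)
  · exact Or.inr h2

-- the dict only ever gains keys, existing entries keep their values across a call
def pvExt (v v' : PySem.Dict String Bool) : Prop :=
  ∀ k, (v.get? k).isSome → v'.get? k = v.get? k

theorem pvExt_refl (v : PySem.Dict String Bool) : pvExt v v := fun _ _ => rfl

-- how many distinct recipe names are not yet memoized
def pvMissing (rs : List String) (v : PySem.Dict String Bool) : Nat :=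
  (rs.dedup.filter (fun m => !(v.get? m).isSome)).length

theorem pvMissing_le (rs : List String) (v : PySem.Dict String Bool) :
    pvMissing rs v ≤ rs.length :=
  le_trans (List.length_filter_le _ _) (List.Sublist.length_le (List.dedup_sublist rs))

theorem pvFilterLen {α : Type} [DecidableEq α] (p p' : α → Bool) (m : α) :
    ∀ (l : List α), l.Nodup → m ∈ l → p m = true →
    (∀ x, x ≠ m → p' x = p x) → p' m = false →
    (l.filter p').length + 1 = (l.filter p).length := by
  intro l
  induction l with
  | nil => intro _ h; cases h
  | cons a t ih =>
    intro hnd hm hp hagree hp'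
    by_cases ham : a = m
    · subst ham
      have hmt : a ∉ t := (List.nodup_cons.1 hnd).1
      have : t.filter p' = t.filter p := by
        apply List.filter_congr
        intro x hx
        exact hagree x (fun h => hmt (h ▸ hx))
      simp [hp, hp', this]
    · rcases List.mem_cons.1 hm with h | hmt
      · exact absurd h.symm ham
      · have := ih (List.nodup_cons.1 hnd).2 hmt hp hagree hp'
        by_cases hpa : p a = true
        · simp [hpa, hagree a ham, this]
        · simp only [Bool.not_eq_true] at hpa
          simp [hpa, hagree a ham, this]

theorem pvMissing_insert {rs : List String} {v : PySem.Dict String Bool} {m : String}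
    (hm : m ∈ rs) (hv : v.get? m = none) (b : Bool) :
    pvMissing rs (v.insert m b) + 1 = pvMissing rs v := by
  unfold pvMissing
  apply pvFilterLen _ _ m
  · exact rs.nodup_dedup
  · exact List.mem_dedup.2 hm
  · simp [hv]
  · intro x hx
    rw [PySem.Dict.get?_insert]
    simp [hx]
  · rw [PySem.Dict.get?_insert]
    simp

theorem pvMissing_mono {rs : List String} {v v' : PySem.Dict String Bool}
    (h : pvExt v v') : pvMissing rs v' ≤ pvMissing rs v := by
  unfold pvMissing
  rw [← List.countP_eq_length_filter, ← List.countP_eq_length_filter]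
  apply List.countP_mono_left
  intro a _ ha
  simp only [Bool.not_eq_eq_eq_not, Bool.not_true, Option.isSome_eq_false_iff,
    Option.isNone_iff_eq_none] at ha ⊢
  by_cases hs : (v.get? a).isSome
  · rw [h a hs] at ha
    rw [Option.isSome_iff_ne_none] at hs
    exact absurd ha hs
  · simpa [Option.isSome_iff_ne_none] using hs

-- main invariant for A's ingredient loop (stated for the same fuel its sub-calls use)
theorem pvIdxOf_append (pre suf : List String) (x : String) (h : x ∉ pre) :
    List.idxOf x (pre ++ x :: suf) = pre.length := by
  induction pre with
  | nil => simp
  | cons a t ih =>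
    have hax : ¬ (a == x) := by simp; rintro rfl; exact h (by simp)
    simp only [List.cons_append, List.idxOf_cons, hax, cond_false, List.length_cons]
    rw [ih (fun hm => h (by simp [hm]))]

theorem pvIngLoopA_spec (rs : List String) (igs : List (List String)) (sps : List String)
    (fuel : Nat)
    (hA : ∀ (node : Int) (v : PySem.Dict String Bool) (st : List String) (r : String),
      PySem.List.pyGet? rs node = some r →
      ((v.get? r).isSome ∨ node = (rs.idxOf r : Int)) →
      pvInv rs igs sps v st → pvChain rs igs sps r st →
      pvMissing rs v < fuel →
      pvExt v (pvCanBeMadeA rs igs sps fuel node v).2 ∧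
      (pvCanBeMadeA rs igs sps fuel node v).2.get? r = some (pvCanBeMadeA rs igs sps fuel node v).1 ∧
      pvInv rs igs sps (pvCanBeMadeA rs igs sps fuel node v).2 st) :
    ∀ (l : List String) (r : String) (v : PySem.Dict String Bool) (st : List String),
      (∀ x ∈ l, x ∈ pvIngs rs igs r) → r ∈ rs →
      (∀ x ∈ pvIngs rs igs r, x ∉ sps → x ∉ l → pvGood rs igs sps x) →
      v.get? r = some false →
      pvInv rs igs sps v (r :: st) → pvChain rs igs sps r st →
      pvMissing rs v < fuel →
      (∀ k, k ≠ r → (v.get? k).isSome → (pvIngLoopA rs igs sps fuel r l v).2.get? k = v.get? k) ∧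
      (pvIngLoopA rs igs sps fuel r l v).2.get? r = some (pvIngLoopA rs igs sps fuel r l v).1 ∧
      pvInv rs igs sps (pvIngLoopA rs igs sps fuel r l v).2 st := by
  intro l
  induction l with
  | nil =>
    intro r v st hsub hr hrest hvr hInv hch hfuel
    simp only [pvIngLoopA]
    refine ⟨?_, PySem.Dict.get?_insert_self v r true, ?_⟩
    · intro k hk _
      exact PySem.Dict.get?_insert_of_ne v true hk
    · have hGood : pvGood rs igs sps r :=
        pvGood.intro r hr (fun x hx hxs => hrest x hx hxs (by simp))
      intro m b hmb
      by_cases hmr : m = r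
      · subst hmr
        rw [PySem.Dict.get?_insert_self] at hmb
        have hb : b = true := by simpa using hmb.symm
        subst hb
        exact ⟨fun _ => hGood, fun h => by cases h⟩
      · rw [PySem.Dict.get?_insert_of_ne v true hmr] at hmb
        refine ⟨(hInv m b hmb).1, fun hb => ?_⟩
        rcases (hInv m b hmb).2 hb with h1 | h2
        · rcases List.mem_cons.1 h1 with h | h
          · exact absurd h hmr
          · exact Or.inl h
        · exact Or.inr h2
  | cons ing rest ih =>
    intro r v st hsub hr hrest hvr hInv hch hfuel
    simp only [pvIngLoopA]
    by_cases hings : ing ∈ sps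
    · simp only [if_pos hings]
      refine ih r v st (fun x hx => hsub x (by simp [hx])) hr ?_ hvr hInv hch hfuel
      intro x hx hxs hxrest
      by_cases hxi : x = ing
      · subst hxi; exact absurd hings hxs
      · exact hrest x hx hxs (by simp [hxi, hxrest])
    · simp only [if_neg hings]
      have hingIng : ing ∈ pvIngs rs igs r := hsub ing (by simp)
      by_cases hingr : ing ∈ rs
      · simp only [if_pos hingr]
        obtain ⟨idx, hidx⟩ :=
          Option.isSome_iff_exists.1 ((PySem.List.index?_isSome_iff rs ing).2 hingr)
        rw [hidx]
        obtain ⟨pre, suf, hdecomp, hlen, hpre⟩ := (PySem.List.index?_eq_some_iff rs ing idx).1 hidx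
        have hidxOf : List.idxOf ing rs = idx := by
          subst hdecomp; subst hlen
          exact pvIdxOf_append pre suf ing hpre
        have hgetIng : PySem.List.pyGet? rs (idx : Int) = some ing := by
          subst hdecomp; subst hlen
          exact PySem.List.pyGet?_append_length pre suf ing
        have hchIng : pvChain rs igs sps ing (r :: st) := ⟨⟨hingIng, hings⟩, hch⟩
        obtain ⟨hpres, hget, hInv'⟩ :=
          hA (idx : Int) v (r :: st) ing hgetIng (Or.inr (by rw [hidxOf])) hInv hchIng hfuel
        cases hres : pvCanBeMadeA rs igs sps fuel (idx : Int) v with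
        | mk b v' =>
        rw [hres] at hpres hget hInv'
        cases b with
        | true =>
          simp only [hres]
          have hGoodIng : pvGood rs igs sps ing := (hInv' ing true hget).1 rfl
          have hvr' : v'.get? r = some false := by
            rw [hpres r (by rw [hvr]; rfl), hvr]
          have hmiss' : pvMissing rs v' < fuel :=
            lt_of_le_of_lt (pvMissing_mono hpres) hfuel
          obtain ⟨ihpres, ihget, ihInv⟩ := ih r v' st (fun x hx => hsub x (by simp [hx])) hr
            (by
              intro x hx hxs hxrest
              by_cases hxi : x = ing
              · subst hxi; exact hGoodIng
              · exact hrest x hx hxs (by simp [hxi, hxrest]))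
            hvr' hInv' hch hmiss'
          refine ⟨?_, ihget, ihInv⟩
          intro k hk hks
          rw [ihpres k hk (by rw [hpres k hks]; exact hks), hpres k hks]
        | false =>
          simp only [hres]
          have hnGood : ¬ pvGood rs igs sps r := by
            rcases (hInv' ing false hget).2 rfl with h1 | h2
            · exact pvChain_cycle hch (by simpa using h1) hingIng hings
            · intro hg
              exact h2 (pvGood_ings hg ing hingIng hings)
          refine ⟨?_, PySem.Dict.get?_insert_self v' r false, ?_⟩
          · intro k hk hks
            rw [PySem.Dict.get?_insert_of_ne v' false hk, hpres k hks]
          · intro m b hmb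
            by_cases hmr : m = r
            · subst hmr
              rw [PySem.Dict.get?_insert_self] at hmb
              have hb : b = false := by simpa using hmb.symm
              subst hb
              exact ⟨(fun h => nomatch h), fun _ => Or.inr hnGood⟩
            · rw [PySem.Dict.get?_insert_of_ne v' false hmr] at hmb
              refine ⟨(hInv' m b hmb).1, fun hb => ?_⟩
              rcases (hInv' m b hmb).2 hb with h1 | h2
              · rcases List.mem_cons.1 h1 with h | h
                · exact absurd h hmr
                · exact Or.inl h
              · exact Or.inr h2
      · simp only [if_neg hingr]
        have hnGood : ¬ pvGood rs igs sps r := by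
          intro hg
          exact hingr (pvGood_mem (pvGood_ings hg ing hingIng hings))
        refine ⟨?_, PySem.Dict.get?_insert_self v r false, ?_⟩
        · intro k hk _
          exact PySem.Dict.get?_insert_of_ne v false hk
        · intro m b hmb
          by_cases hmr : m = r
          · subst hmr
            rw [PySem.Dict.get?_insert_self] at hmb
            have hb : b = false := by simpa using hmb.symm
            subst hb
            exact ⟨(fun h => nomatch h), fun _ => Or.inr hnGood⟩
          · rw [PySem.Dict.get?_insert_of_ne v false hmr] at hmb
            refine ⟨(hInv m b hmb).1, fun hb => ?_⟩
            rcases (hInv m b hmb).2 hb with h1 | h2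
            · rcases List.mem_cons.1 h1 with h | h
              · exact absurd h hmr
              · exact Or.inl h
            · exact Or.inr h2

-- main invariant for A's can_be_made
theorem pvCanBeMadeA_spec (rs : List String) (igs : List (List String)) (sps : List String)
    (hpre : ∀ m ∈ rs, List.idxOf m rs < igs.length) :
    ∀ (fuel : Nat) (node : Int) (v : PySem.Dict String Bool) (st : List String) (r : String),
      PySem.List.pyGet? rs node = some r →
      ((v.get? r).isSome ∨ node = (rs.idxOf r : Int)) →
      pvInv rs igs sps v st → pvChain rs igs sps r st →
      pvMissing rs v < fuel →
      pvExt v (pvCanBeMadeA rs igs sps fuel node v).2 ∧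
      (pvCanBeMadeA rs igs sps fuel node v).2.get? r = some (pvCanBeMadeA rs igs sps fuel node v).1 ∧
      pvInv rs igs sps (pvCanBeMadeA rs igs sps fuel node v).2 st := by
  intro fuel
  induction fuel with
  | zero => intro node v st r _ _ _ _ hfuel; exact absurd hfuel (by omega)
  | succ fuel ih =>
    intro node v st r hget hfirst hInv hch hfuel
    simp only [pvCanBeMadeA, hget]
    cases hvr : v.get? r with
    | some b =>
      simp only [hvr]
      exact ⟨pvExt_refl v, trivial, hInv⟩
    | none =>
      have hnode : node = (List.idxOf r rs : Int) := by
        rcases hfirst with h | h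
        · rw [hvr] at h; cases h
        · exact h
      have hr : r ∈ rs := PySem.List.mem_of_pyGet?_eq_some rs hget
      have hlt : List.idxOf r rs < igs.length := hpre r hr
      have higs : PySem.List.pyGet? igs node = some (pvIngs rs igs r) := by
        rw [hnode, PySem.List.pyGet?_natCast, List.getElem?_eq_getElem hlt]
        unfold pvIngs
        rw [List.getD_eq_getElem _ _ hlt]
      simp only [higs]
      have hv1r : (v.insert r false).get? r = some false := PySem.Dict.get?_insert_self v r false
      have hInv1 : pvInv rs igs sps (v.insert r false) (r :: st) := by
        intro m b hmb
        by_cases hmr : m = r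
        · subst hmr
          rw [PySem.Dict.get?_insert_self] at hmb
          have hb : b = false := by simpa using hmb.symm
          subst hb
          exact ⟨(fun h => nomatch h), fun _ => Or.inl (by simp)⟩
        · rw [PySem.Dict.get?_insert_of_ne v false hmr] at hmb
          exact (pvInv_mono hInv (by intro y hy; simp [hy])) m b hmb
      have hmiss1 : pvMissing rs (v.insert r false) < fuel := by
        have := pvMissing_insert hr hvr false
        omega
      obtain ⟨bpres, bget, bInv⟩ := pvIngLoopA_spec rs igs sps fuel ih (pvIngs rs igs r) r
        (v.insert r false) st (fun _ hx => hx) hr (fun x hx _ hnx => absurd hx hnx)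
        hv1r hInv1 hch hmiss1
      refine ⟨?_, bget, bInv⟩
      intro k hks
      have hkr : k ≠ r := by
        intro h
        subst h
        rw [hvr] at hks
        cases hks
      rw [bpres k hkr (by rw [PySem.Dict.get?_insert_of_ne v false hkr]; exact hks),
          PySem.Dict.get?_insert_of_ne v false hkr]

-- A's top-level loop accumulates exactly the recipes satisfying f (a decision for pvGood)
theorem pvLoopA_spec (rs : List String) (igs : List (List String)) (sps : List String)
    (hpre : ∀ m ∈ rs, List.idxOf m rs < igs.length) (f : String → Bool)
    (hf : ∀ m, f m = true ↔ pvGood rs igs sps m) :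
    ∀ (suf pre : List String) (v : PySem.Dict String Bool) (res : List String),
      rs = pre ++ suf →
      (∀ m ∈ pre, (v.get? m).isSome) →
      pvInv rs igs sps v [] →
      ((PySem.List.enumerate suf (pre.length : Int)).foldl
        (fun (st : PySem.Dict String Bool × List String) p =>
          match pvCanBeMadeA rs igs sps (rs.length + 1) p.1 st.1 with
          | (b, v) => (v, if b then st.2 ++ [p.2] else st.2))
        (v, res)).2 = res ++ suf.filter f := by
  intro suf
  induction suf with
  | nil =>
    intro pre v res _ _ _
    simp [PySem.List.enumerate_nil]
  | cons name rest ih =>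
    intro pre v res hsplit hpref hInv
    rw [PySem.List.enumerate_cons, List.foldl_cons]
    have hget : PySem.List.pyGet? rs (pre.length : Int) = some name := by
      rw [hsplit]
      exact PySem.List.pyGet?_append_length pre rest name
    have hfirst : (v.get? name).isSome ∨ (pre.length : Int) = (List.idxOf name rs : Int) := by
      by_cases hmem : name ∈ pre
      · exact Or.inl (hpref name hmem)
      · refine Or.inr ?_
        rw [hsplit, pvIdxOf_append pre rest name hmem]
    have hfuel : pvMissing rs v < rs.length + 1 :=
      lt_of_le_of_lt (pvMissing_le rs v) (by omega)
    obtain ⟨apres, aget, aInv⟩ := pvCanBeMadeA_spec rs igs sps hpre (rs.length + 1)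
      (pre.length : Int) v [] name hget hfirst hInv trivial hfuel
    cases hres : pvCanBeMadeA rs igs sps (rs.length + 1) (pre.length : Int) v with
    | mk b v' =>
    rw [hres] at apres aget aInv
    have hb : b = f name := by
      cases b with
      | true =>
        have := (aInv name true aget).1 rfl
        exact ((hf name).2 this).symm
      | false =>
        rcases (aInv name false aget).2 rfl with h | h
        · cases h
        · cases hfn : f name
          · rfl
          · exact absurd ((hf name).1 hfn) h
    have hstep := ih (pre ++ [name]) v' (if b then res ++ [name] else res)
      (by rw [hsplit]; simp)
      (by
        intro m hm
        rcases List.mem_append.1 hm with h | h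
        · rw [apres m (hpref m h)]
          exact hpref m h
        · have hm' : m = name := by simpa using h
          subst hm'
          rw [aget]
          rfl)
      aInv
    have hlen : (((pre ++ [name]).length : Nat) : Int) = (pre.length : Int) + 1 := by
      simp
    rw [hlen] at hstep
    rw [hstep, hb]
    cases hfn : f name <;> simp [hfn]

-- ===== B-side lemmas =====

-- B's first-occurrence dict, named for the proofs (definitionally the fold in the port)
def pvFirstB (rs : List String) (igs : List (List String)) : PySem.Dict String (List String) :=
  (rs.zip igs).foldl
    (fun d (p : String × List String) => if d.contains p.1 then d else d.insert p.1 p.2)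
    PySem.Dict.empty

set_option maxRecDepth 4096 in
theorem pvSdFold_get? {K V : Type} [BEq K] [LawfulBEq K] :
    ∀ (l : List (K × V)) (d : PySem.Dict K V) (m : K),
      (l.foldl (fun d p => if d.contains p.1 then d else d.insert p.1 p.2) d).get? m
        = (d.get? m).or ((l.find? (fun p => p.1 == m)).map (·.2)) := by
  intro l
  induction l with
  | nil => intro d m; simp
  | cons p t ih =>
    intro d m
    rw [List.foldl_cons, List.find?_cons]
    by_cases hc : d.contains p.1 = true
    · rw [if_pos hc]
      by_cases hpm : p.1 == m
      · have hm : p.1 = m := by simpa using hpm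
        subst hm
        have : (d.get? p.1).isSome := by rw [← PySem.Dict.contains_eq_isSome_get?]; exact hc
        obtain ⟨w, hw⟩ := Option.isSome_iff_exists.1 this
        rw [ih d p.1, hw]
        rfl
      · simp only [hpm]
        exact ih d m
    · rw [if_neg hc]
      have hnone : d.get? p.1 = none := by
        rw [Bool.not_eq_true, PySem.Dict.contains_eq_isSome_get?] at hc
        simpa using hc
      by_cases hpm : p.1 == m
      · have hm : p.1 = m := by simpa using hpm
        subst hm
        rw [ih (d.insert p.1 p.2) p.1, PySem.Dict.get?_insert_self, hnone]
        simp
      · have hne : m ≠ p.1 := fun h => hpm (by simp [h])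
        simp only [hpm]
        rw [ih, PySem.Dict.get?_insert_of_ne _ _ hne]

theorem pvZipFind (m : String) :
    ∀ (rs : List String) (igs : List (List String)),
      (m ∈ rs → List.idxOf m rs < igs.length) →
      ((rs.zip igs).find? (fun p => p.1 == m)).map (·.2)
        = if m ∈ rs then some (igs.getD (List.idxOf m rs) []) else none := by
  intro rs
  induction rs with
  | nil => intro igs _; simp
  | cons r t ih =>
    intro igs hm
    cases igs with
    | nil =>
      have : m ∉ r :: t := fun h => by simpa using hm h
      simp [this]
    | cons i it =>
      by_cases hrm : r = m
      · subst hrm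
        simp [List.zip_cons_cons]
      · have hne : ¬ (r == m) := by simpa using hrm
        rw [List.zip_cons_cons, List.find?_cons]
        simp only [hne]
        rw [ih it (by
          intro hmt
          have := hm (by simp [hmt])
          rw [List.idxOf_cons] at this
          simp [hne] at this
          omega)]
        by_cases hmt : m ∈ t
        · simp only [if_pos hmt, if_pos (show m ∈ r :: t by simp [hmt])]
          rw [List.idxOf_cons]
          simp [hne]
        · have hmr : ¬ m = r := fun h => hrm h.symm
          simp [hmt, hmr]

theorem pvSdFold_nodup {K V : Type} [BEq K] [LawfulBEq K] :
    ∀ (l : List (K × V)) (d : PySem.Dict K V), d.keys.Nodup →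
      (l.foldl (fun d p => if d.contains p.1 then d else d.insert p.1 p.2) d).keys.Nodup := by
  intro l
  induction l with
  | nil => intro d h; exact h
  | cons p t ih =>
    intro d h
    rw [List.foldl_cons]
    by_cases hc : d.contains p.1 = true
    · rw [if_pos hc]; exact ih d h
    · rw [if_neg hc]; exact ih _ (PySem.Dict.nodup_keys_insert d p.1 p.2 h)

theorem pvFirstB_get? (rs : List String) (igs : List (List String))
    (hpre : ∀ m ∈ rs, List.idxOf m rs < igs.length) (m : String) :
    (pvFirstB rs igs).get? m = if m ∈ rs then some (pvIngs rs igs m) else none := by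
  unfold pvFirstB
  rw [pvSdFold_get?, PySem.Dict.get?_empty, pvZipFind m rs igs (fun hm => hpre m hm)]
  unfold pvIngs
  by_cases hm : m ∈ rs <;> simp [hm]

theorem pvFirstB_nodupKeys (rs : List String) (igs : List (List String)) :
    (pvFirstB rs igs).keys.Nodup :=
  pvSdFold_nodup _ _ PySem.Dict.nodup_keys_empty

theorem pvFirstB_items_mem (rs : List String) (igs : List (List String))
    (hpre : ∀ m ∈ rs, List.idxOf m rs < igs.length) {p : String × List String}
    (hp : p ∈ (pvFirstB rs igs).items) : p.1 ∈ rs ∧ p.2 = pvIngs rs igs p.1 := by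
  have hget : (pvFirstB rs igs).get? p.1 = some p.2 :=
    PySem.Dict.get?_of_mem_items _ (by cases p; exact hp) (pvFirstB_nodupKeys rs igs)
  rw [pvFirstB_get? rs igs hpre] at hget
  by_cases hm : p.1 ∈ rs
  · rw [if_pos hm] at hget
    exact ⟨hm, by injection hget with h; exact h.symm⟩
  · rw [if_neg hm] at hget
    cases hget

theorem pvFirstB_items_of_mem (rs : List String) (igs : List (List String))
    (hpre : ∀ m ∈ rs, List.idxOf m rs < igs.length) {m : String} (hm : m ∈ rs) :
    (m, pvIngs rs igs m) ∈ (pvFirstB rs igs).items :=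
  PySem.Dict.mem_items_of_get?_eq_some _ (by rw [pvFirstB_get? rs igs hpre, if_pos hm])

-- ===== pass / saturation lemmas =====

theorem pvPass_mem (sup : PySem.Set String) :
    ∀ (items : List (String × List String)) (st : PySem.Set String × Bool) (x : String),
      x ∈ st.1 → x ∈ (pvPassB sup items st).1 := by
  intro items
  induction items with
  | nil => intro st x hx; exact hx
  | cons p t ih =>
    intro st x hx
    unfold pvPassB
    rw [List.foldl_cons]
    by_cases hcond : (!(PySem.Set.contains st.1 p.1) &&
        p.2.all (fun y => PySem.Set.contains sup y || PySem.Set.contains st.1 y)) = true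
    · rw [if_pos hcond]
      exact ih _ x ((PySem.Set.mem_add st.1 p.1 x).2 (Or.inl hx))
    · rw [if_neg hcond]
      exact ih _ x hx

theorem pvPass_flag (sup : PySem.Set String) :
    ∀ (items : List (String × List String)) (st : PySem.Set String × Bool),
      st.2 = true → (pvPassB sup items st).2 = true := by
  intro items
  induction items with
  | nil => intro st h; exact h
  | cons p t ih =>
    intro st h
    unfold pvPassB
    rw [List.foldl_cons]
    by_cases hcond : (!(PySem.Set.contains st.1 p.1) &&
        p.2.all (fun y => PySem.Set.contains sup y || PySem.Set.contains st.1 y)) = true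
    · rw [if_pos hcond]; exact ih _ rfl
    · rw [if_neg hcond]; exact ih _ h

theorem pvPass_len (sup : PySem.Set String) :
    ∀ (items : List (String × List String)) (st : PySem.Set String × Bool),
      st.1.length ≤ (pvPassB sup items st).1.length := by
  intro items
  induction items with
  | nil => intro st; exact le_refl _
  | cons p t ih =>
    intro st
    unfold pvPassB
    rw [List.foldl_cons]
    by_cases hcond : (!(PySem.Set.contains st.1 p.1) &&
        p.2.all (fun y => PySem.Set.contains sup y || PySem.Set.contains st.1 y)) = true
    · rw [if_pos hcond]
      refine le_trans ?_ (ih (PySem.Set.add st.1 p.1, true))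
      unfold PySem.Set.add
      split <;> simp
    · rw [if_neg hcond]; exact ih st

theorem pvPass_changed (sup : PySem.Set String) :
    ∀ (items : List (String × List String)) (st : PySem.Set String × Bool),
      (pvPassB sup items st).2 = true →
      st.2 = true ∨ st.1.length < (pvPassB sup items st).1.length := by
  intro items
  induction items with
  | nil => intro st h; exact Or.inl h
  | cons p t ih =>
    intro st h
    unfold pvPassB at h ⊢
    rw [List.foldl_cons] at h ⊢
    by_cases hcond : (!(PySem.Set.contains st.1 p.1) &&
        p.2.all (fun y => PySem.Set.contains sup y || PySem.Set.contains st.1 y)) = true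
    · rw [if_pos hcond] at h ⊢
      refine Or.inr (lt_of_lt_of_le ?_ (pvPass_len sup t (PySem.Set.add st.1 p.1, true)))
      have hnc : PySem.Set.contains st.1 p.1 = false := by
        have h' := hcond
        simp only [Bool.and_eq_true, Bool.not_eq_true'] at h'
        exact h'.1
      unfold PySem.Set.add
      rw [hnc]
      simp
    · rw [if_neg hcond] at h ⊢
      rcases ih st h with h1 | h2
      · exact Or.inl h1
      · exact Or.inr h2

theorem pvPass_unchanged (sup : PySem.Set String) :
    ∀ (items : List (String × List String)) (st : PySem.Set String × Bool),
      (pvPassB sup items st).2 = false → pvPassB sup items st = st := by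
  intro items
  induction items with
  | nil => intro st _; rfl
  | cons p t ih =>
    intro st h
    unfold pvPassB at h ⊢
    rw [List.foldl_cons] at h ⊢
    by_cases hcond : (!(PySem.Set.contains st.1 p.1) &&
        p.2.all (fun y => PySem.Set.contains sup y || PySem.Set.contains st.1 y)) = true
    · rw [if_pos hcond] at h
      have := pvPass_flag sup t (PySem.Set.add st.1 p.1, true) rfl
      unfold pvPassB at this
      rw [this] at h
      cases h
    · rw [if_neg hcond] at h ⊢
      exact ih st h

theorem pvPass_names (sup : PySem.Set String) :
    ∀ (items : List (String × List String)) (st : PySem.Set String × Bool) (x : String),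
      x ∈ (pvPassB sup items st).1 → x ∈ st.1 ∨ x ∈ items.map (·.1) := by
  intro items
  induction items with
  | nil => intro st x hx; exact Or.inl hx
  | cons p t ih =>
    intro st x hx
    unfold pvPassB at hx
    rw [List.foldl_cons] at hx
    by_cases hcond : (!(PySem.Set.contains st.1 p.1) &&
        p.2.all (fun y => PySem.Set.contains sup y || PySem.Set.contains st.1 y)) = true
    · rw [if_pos hcond] at hx
      rcases ih _ x hx with h1 | h2
      · rcases (PySem.Set.mem_add st.1 p.1 x).1 h1 with h3 | h4
        · exact Or.inl h3
        · exact Or.inr (by simp [h4])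
      · exact Or.inr (by simp [h2])
    · rw [if_neg hcond] at hx
      rcases ih st x hx with h1 | h2
      · exact Or.inl h1
      · exact Or.inr (by simp [h2])

theorem pvPass_nodup (sup : PySem.Set String) :
    ∀ (items : List (String × List String)) (st : PySem.Set String × Bool),
      st.1.Nodup → (pvPassB sup items st).1.Nodup := by
  intro items
  induction items with
  | nil => intro st h; exact h
  | cons p t ih =>
    intro st h
    unfold pvPassB
    rw [List.foldl_cons]
    by_cases hcond : (!(PySem.Set.contains st.1 p.1) &&
        p.2.all (fun y => PySem.Set.contains sup y || PySem.Set.contains st.1 y)) = true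
    · rw [if_pos hcond]
      exact ih _ (PySem.Set.nodup_add st.1 p.1 h)
    · rw [if_neg hcond]
      exact ih st h

theorem pvPass_sound (rs : List String) (igs : List (List String)) (sps : List String) :
    ∀ (items : List (String × List String)) (st : PySem.Set String × Bool),
      (∀ p ∈ items, p.1 ∈ rs ∧ p.2 = pvIngs rs igs p.1) →
      (∀ x ∈ st.1, pvGood rs igs sps x) →
      ∀ x ∈ (pvPassB (PySem.Set.ofList sps) items st).1, pvGood rs igs sps x := by
  intro items
  induction items with
  | nil => intro st _ hst x hx; exact hst x hx
  | cons p t ih =>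
    intro st hitems hst x hx
    unfold pvPassB at hx
    rw [List.foldl_cons] at hx
    by_cases hcond : (!(PySem.Set.contains st.1 p.1) &&
        p.2.all (fun y => PySem.Set.contains (PySem.Set.ofList sps) y ||
          PySem.Set.contains st.1 y)) = true
    · rw [if_pos hcond] at hx
      refine ih _ (fun q hq => hitems q (by simp [hq])) ?_ x hx
      intro y hy
      rcases (PySem.Set.mem_add st.1 p.1 y).1 hy with h1 | h2
      · exact hst y h1
      · subst h2
        obtain ⟨hp1, hp2⟩ := hitems p (by simp)
        refine pvGood.intro p.1 hp1 ?_
        intro z hz hzs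
        have h' := hcond
        simp only [Bool.and_eq_true] at h'
        have hall := h'.2
        rw [List.all_eq_true] at hall
        have hz' := hall z (by rw [← hp2] at hz; exact hz)
        simp only [Bool.or_eq_true] at hz'
        rcases hz' with h3 | h4
        · exact absurd ((PySem.Set.mem_ofList sps z).1 ((PySem.Set.contains_iff _ z).1 h3)) hzs
        · exact hst z ((PySem.Set.contains_iff _ z).1 h4)
    · rw [if_neg hcond] at hx
      exact ih st (fun q hq => hitems q (by simp [hq])) hst x hx

theorem pvPass_catch (sps : List String) :
    ∀ (items : List (String × List String)) (st : PySem.Set String × Bool)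
      (s0 : List String) (n : String) (i : List String),
      (∀ x ∈ s0, x ∈ st.1) → (n, i) ∈ items → (∀ x ∈ i, x ∈ sps ∨ x ∈ s0) →
      n ∈ (pvPassB (PySem.Set.ofList sps) items st).1 := by
  intro items
  induction items with
  | nil => intro st s0 n i _ h; cases h
  | cons p t ih =>
    intro st s0 n i hs0 hmem hcond
    unfold pvPassB
    rw [List.foldl_cons]
    rcases List.mem_cons.1 hmem with hp | ht
    · by_cases hc : PySem.Set.contains st.1 p.1 = true
      · have hn : n ∈ st.1 := by
          have := (PySem.Set.contains_iff st.1 p.1).1 hc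
          rw [← hp] at this
          exact this
        by_cases hcond2 : (!(PySem.Set.contains st.1 p.1) &&
            p.2.all (fun y => PySem.Set.contains (PySem.Set.ofList sps) y ||
              PySem.Set.contains st.1 y)) = true
        · rw [if_pos hcond2]
          exact pvPass_mem _ t _ n ((PySem.Set.mem_add st.1 p.1 n).2 (Or.inl hn))
        · rw [if_neg hcond2]
          exact pvPass_mem _ t st n hn
      · have hall : p.2.all (fun y => PySem.Set.contains (PySem.Set.ofList sps) y ||
            PySem.Set.contains st.1 y) = true := by
          rw [List.all_eq_true]
          intro z hz
          have hz' : z ∈ i := by rw [← hp] at hz; exact hz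
          rcases hcond z hz' with h1 | h2
          · simp only [Bool.or_eq_true]
            exact Or.inl ((PySem.Set.contains_iff _ z).2 ((PySem.Set.mem_ofList sps z).2 h1))
          · simp only [Bool.or_eq_true]
            exact Or.inr ((PySem.Set.contains_iff _ z).2 (hs0 z h2))
        rw [if_pos (by rw [Bool.and_eq_true]; exact ⟨by rw [Bool.not_eq_true] at hc; simp only [Bool.not_eq_true']; exact hc, hall⟩)]
        refine pvPass_mem _ t _ n ?_
        rw [PySem.Set.mem_add]
        exact Or.inr (by rw [← hp])
    · by_cases hcond2 : (!(PySem.Set.contains st.1 p.1) &&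
          p.2.all (fun y => PySem.Set.contains (PySem.Set.ofList sps) y ||
            PySem.Set.contains st.1 y)) = true
      · rw [if_pos hcond2]
        refine ih _ s0 n i ?_ ht hcond
        intro x hx
        exact (PySem.Set.mem_add st.1 p.1 x).2 (Or.inl (hs0 x hx))
      · rw [if_neg hcond2]
        exact ih st s0 n i hs0 ht hcond

theorem pvSat_sound (rs : List String) (igs : List (List String)) (sps : List String)
    (items : List (String × List String))
    (hitems : ∀ p ∈ items, p.1 ∈ rs ∧ p.2 = pvIngs rs igs p.1) :
    ∀ (n : Nat) (s : PySem.Set String),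
      (∀ x ∈ s, pvGood rs igs sps x) →
      ∀ x ∈ pvSaturateB (PySem.Set.ofList sps) items n s, pvGood rs igs sps x := by
  intro n
  induction n with
  | zero => intro s hst x hx; exact hst x hx
  | succ n ih =>
    intro s hst x hx
    simp only [pvSaturateB] at hx
    revert hx
    cases hps : pvPassB (PySem.Set.ofList sps) items (s, false) with
    | mk s' ch =>
    have h1 : (pvPassB (PySem.Set.ofList sps) items (s, false)).1 = s' := by rw [hps]
    cases ch with
    | false =>
      intro hx
      have h2 := pvPass_unchanged (PySem.Set.ofList sps) items (s, false) (by rw [hps])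
      rw [hps] at h2
      have hs' : s' = s := congrArg Prod.fst h2
      rw [hs'] at hx
      exact hst x hx
    | true =>
      intro hx
      refine ih s' ?_ x hx
      intro y hy
      exact pvPass_sound rs igs sps items (s, false) hitems hst y (h1 ▸ hy)

theorem pvLenLe {l l' : List String} (hl : l.Nodup) (h : ∀ x ∈ l, x ∈ l') :
    l.length ≤ l'.length := by
  calc l.length = l.toFinset.card := (List.toFinset_card_of_nodup hl).symm
    _ ≤ l'.toFinset.card :=
        Finset.card_le_card (fun x hx => List.mem_toFinset.2 (h x (List.mem_toFinset.1 hx)))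
    _ ≤ l'.length := List.toFinset_card_le l'

theorem pvSupset {s ks : List String} (hs : s.Nodup) (hk : ks.Nodup)
    (hsub : ∀ x ∈ s, x ∈ ks) (hlen : ks.length ≤ s.length) : ∀ x ∈ ks, x ∈ s := by
  have h1 : s.toFinset ⊆ ks.toFinset :=
    fun x hx => List.mem_toFinset.2 (hsub x (List.mem_toFinset.1 hx))
  have h2 : ks.toFinset.card ≤ s.toFinset.card := by
    rw [List.toFinset_card_of_nodup hs]
    exact le_trans (List.toFinset_card_le ks) hlen
  have h3 := Finset.eq_of_subset_of_card_le h1 h2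
  intro x hx
  rw [← List.mem_toFinset, ← h3, List.mem_toFinset] at hx
  exact hx

theorem pvSat_closed (sps : List String) (items : List (String × List String)) :
    ∀ (n : Nat) (s : PySem.Set String), s.Nodup →
      (∀ x ∈ s, x ∈ items.map (·.1)) → (items.map (·.1)).Nodup →
      (items.map (·.1)).length ≤ n + s.length →
      ∀ p ∈ items, (∀ x ∈ p.2, x ∈ sps ∨ x ∈ pvSaturateB (PySem.Set.ofList sps) items n s) →
      p.1 ∈ pvSaturateB (PySem.Set.ofList sps) items n s := by
  intro n
  induction n with
  | zero =>
    intro s hs hsub hk hlen p hp _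
    exact pvSupset hs hk hsub (by simpa using hlen) p.1 (List.mem_map.2 ⟨p, hp, rfl⟩)
  | succ n ih =>
    intro s hs hsub hk hlen p hp
    simp only [pvSaturateB]
    cases hps : pvPassB (PySem.Set.ofList sps) items (s, false) with
    | mk s' ch =>
    have h1 : (pvPassB (PySem.Set.ofList sps) items (s, false)).1 = s' := by rw [hps]
    cases ch with
    | false =>
      intro hcondp
      have h2 := pvPass_unchanged (PySem.Set.ofList sps) items (s, false) (by rw [hps])
      rw [hps] at h2
      have hs' : s' = s := congrArg Prod.fst h2
      have hcatch := pvPass_catch sps items (s, false) s p.1 p.2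
        (fun x hx => hx) (by rw [← (show (p.1, p.2) = p from rfl)] at hp; exact hp)
        (by intro x hx; rcases hcondp x hx with h | h
            · exact Or.inl h
            · rw [hs'] at h; exact Or.inr h)
      rw [h1] at hcatch
      simpa using hcatch
    | true =>
      intro hcondp
      have hch : (pvPassB (PySem.Set.ofList sps) items (s, false)).2 = true := by rw [hps]
      have hlt : s.length < s'.length := by
        rcases pvPass_changed (PySem.Set.ofList sps) items (s, false) hch with h | h
        · cases h
        · rw [h1] at h; exact h
      refine ih s' (h1 ▸ pvPass_nodup _ items (s, false) hs) ?_ hk (by omega) p hp hcondp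
      intro x hx
      rcases pvPass_names (PySem.Set.ofList sps) items (s, false) x (h1 ▸ hx) with hy | hy
      · exact hsub x hy
      · exact hy

-- B's final makeable set
def pvFinalB (rs : List String) (igs : List (List String)) (sps : List String) :
    PySem.Set String :=
  pvSaturateB (PySem.Set.ofList sps) (pvFirstB rs igs).items rs.length PySem.Set.empty

theorem pvFinalB_iff (rs : List String) (igs : List (List String)) (sps : List String)
    (hpre : ∀ m ∈ rs, List.idxOf m rs < igs.length) :
    ∀ m, PySem.Set.contains (pvFinalB rs igs sps) m = true ↔ pvGood rs igs sps m := by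
  intro m
  constructor
  · intro h
    exact pvSat_sound rs igs sps _ (fun p hp => pvFirstB_items_mem rs igs hpre hp)
      rs.length PySem.Set.empty (fun x hx => by cases hx) m
      ((PySem.Set.contains_iff _ m).1 h)
  · intro hg
    induction hg with
    | intro m hm h ihg =>
      rw [PySem.Set.contains_iff]
      have hkeys_nodup : ((pvFirstB rs igs).items.map (·.1)).Nodup := by
        have := pvFirstB_nodupKeys rs igs
        simpa [PySem.Dict.keys] using this
      have hkeys_sub : ∀ k ∈ (pvFirstB rs igs).items.map (·.1), k ∈ rs := by
        intro k hk
        obtain ⟨p, hp, rfl⟩ := List.mem_map.1 hk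
        exact (pvFirstB_items_mem rs igs hpre hp).1
      have hlen : ((pvFirstB rs igs).items.map (·.1)).length
          ≤ rs.length + (PySem.Set.empty : PySem.Set String).length := by
        simpa using pvLenLe hkeys_nodup hkeys_sub
      refine pvSat_closed sps (pvFirstB rs igs).items rs.length PySem.Set.empty
        List.nodup_nil (fun x hx => by cases hx) hkeys_nodup hlen
        (m, pvIngs rs igs m) (pvFirstB_items_of_mem rs igs hpre hm) ?_
      intro x hx
      by_cases hxs : x ∈ sps
      · exact Or.inl hxs
      · exact Or.inr ((PySem.Set.contains_iff _ x).1 (ihg x hx hxs))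

-- ===== VERDICT (by name: the statement is the Claim_ definition above) =====
theorem can_receipe_be_made_spec : Claim_equal_can_receipe_be_made := by
  unfold Claim_equal_can_receipe_be_made
  intro rs igs sps _ hpre
  unfold Spec_can_receipe_be_made
  have hloop := pvLoopA_spec rs igs sps hpre
    (fun m => PySem.Set.contains (pvFinalB rs igs sps) m)
    (pvFinalB_iff rs igs sps hpre) rs [] PySem.Dict.empty []
    rfl (fun m hm => by cases hm)
    (fun m b hmb => by rw [PySem.Dict.get?_empty] at hmb; cases hmb)
  have hz : ((([] : List String)).length : Int) = 0 := by simp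
  rw [hz] at hloop
  unfold can_receipe_be_made
  rw [show can_receipe_be_made_alt rs igs sps
      = rs.filter (fun name => PySem.Set.contains (pvFinalB rs igs sps) name) from rfl]
  simpa using hloop
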